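-- pv_equiv track=rewrite | github.com/yeon-hong/coding-test | 프로그래머스/2/135807. 숫자 카드 나누기/숫자 카드 나누기.py | is_not_divisor
-- ===== SOURCE A (Python) =====
-- def is_not_divisor(divisors, arr):
--     result = 0
--     for div in divisors:
--         for num in arr:
--             if num % div == 0:
--                 break
--
--         else:
--             result = max(result, div)
--     return result
-- ===== SOURCE B (Python) =====
-- def is_not_divisor(divisors, arr):
--     bad = set()
--     for num in arr:
--         for div in divisors:
--             if num % div == 0:
--                 bad.add(div)
--     return max((d for d in divisors if d > 0 and d not in bad), default=0)
-- ===== Notes on version B (the rewrite author's own statement) =====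
-- stated objective: alternative
-- what changed: B builds an exclusion set of divisors hit by some array element in one accumulate pass, then answers with a single max over the remaining (positive) divisors, instead of A's per-divisor short-circuit scan with a running maximum and for-else.
import Mathlib
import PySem

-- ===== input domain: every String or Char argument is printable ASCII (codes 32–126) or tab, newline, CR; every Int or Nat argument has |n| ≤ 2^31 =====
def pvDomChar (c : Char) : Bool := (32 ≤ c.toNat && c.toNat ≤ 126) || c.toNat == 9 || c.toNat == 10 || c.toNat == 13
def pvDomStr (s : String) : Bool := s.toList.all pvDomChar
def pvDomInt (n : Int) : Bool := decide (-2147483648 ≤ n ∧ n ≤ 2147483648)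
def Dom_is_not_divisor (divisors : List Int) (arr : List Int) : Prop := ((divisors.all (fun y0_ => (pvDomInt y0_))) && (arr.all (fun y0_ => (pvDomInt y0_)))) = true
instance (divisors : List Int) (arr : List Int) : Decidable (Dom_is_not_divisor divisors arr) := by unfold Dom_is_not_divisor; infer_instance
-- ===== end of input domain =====

-- B replaces A's per-divisor for-else scan by building an exclusion set once and taking one max over the remaining positive divisors (alternative decomposition, same cost).


-- ===== PORT A =====
def is_not_divisor (divisors : List Int) (arr : List Int) : Int :=
  divisors.foldl (fun result div =>
    if arr.any (fun num => PySem.Int.mod num div == 0) then result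
    else max result div) 0

-- ===== PORT B =====
-- B's local variable 'bad' (the exclusion set built by the nested accumulate loop)
def pvBad (divisors : List Int) (arr : List Int) : PySem.Set Int :=
  arr.foldl (fun s num =>
    divisors.foldl (fun s div =>
      if PySem.Int.mod num div == 0 then PySem.Set.add s div else s) s) PySem.Set.empty

def is_not_divisor_alt (divisors : List Int) (arr : List Int) : Int :=
  match PySem.List.max? (divisors.filter (fun d =>
      decide (0 < d) && !(PySem.Set.contains (pvBad divisors arr) d))) (fun x => x) with
  | some m => m
  | none => 0

-- ===== PRECONDITION & SPEC =====
-- Pre_ excludes exactly the inputs on which Python A raises ZeroDivisionError: divisor 0 with a nonempty arr.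
def Pre_is_not_divisor (divisors : List Int) (arr : List Int) : Prop := (0 : Int) ∈ divisors → arr = []
instance (divisors : List Int) (arr : List Int) : Decidable (Pre_is_not_divisor divisors arr) := by unfold Pre_is_not_divisor; infer_instance
def pvWitness_is_not_divisor : List Int × List Int := ([3, 7], [6, 12])
def Spec_is_not_divisor (divisors : List Int) (arr : List Int) (out : Int) : Prop := out = is_not_divisor_alt divisors arr
instance (divisors : List Int) (arr : List Int) (out : Int) : Decidable (Spec_is_not_divisor divisors arr out) := by unfold Spec_is_not_divisor; infer_instance

-- ===== CLAIM (what is proved, stated in full; the proofs are below) =====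
def Claim_equal_is_not_divisor : Prop := ∀ (divisors : List Int) (arr : List Int), Dom_is_not_divisor divisors arr → Pre_is_not_divisor divisors arr → Spec_is_not_divisor divisors arr (is_not_divisor divisors arr)

-- ===== LEMMAS AND PROOFS =====

-- membership in the inner fold over divisors
theorem mem_innerFold (divisors : List Int) (num : Int) (s : PySem.Set Int) (d : Int) :
    d ∈ divisors.foldl (fun s div =>
      if PySem.Int.mod num div == 0 then PySem.Set.add s div else s) s ↔
      d ∈ s ∨ (d ∈ divisors ∧ PySem.Int.mod num d = 0) := by
  induction divisors generalizing s with
  | nil => simp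
  | cons x t ih =>
    simp only [List.foldl_cons, ih]
    by_cases hx : PySem.Int.mod num x = 0
    · simp [hx, PySem.Set.mem_add]
      constructor
      · rintro ((h | rfl) | h)
        · exact Or.inl h
        · exact Or.inr ⟨Or.inl rfl, hx⟩
        · exact Or.inr ⟨Or.inr h.1, h.2⟩
      · rintro (h | ⟨(rfl | h), hm⟩)
        · exact Or.inl (Or.inl h)
        · exact Or.inl (Or.inr rfl)
        · exact Or.inr ⟨h, hm⟩
    · simp only [beq_iff_eq, hx, if_false, List.mem_cons]
      constructor
      · rintro (h | h)
        · exact Or.inl h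
        · exact Or.inr ⟨Or.inr h.1, h.2⟩
      · rintro (h | ⟨(rfl | h), hm⟩)
        · exact Or.inl h
        · exact absurd hm hx
        · exact Or.inr ⟨h, hm⟩

-- membership in the bad set
theorem mem_badFold (divisors arr : List Int) (s : PySem.Set Int) (d : Int) :
    d ∈ arr.foldl (fun s num =>
      divisors.foldl (fun s div =>
        if PySem.Int.mod num div == 0 then PySem.Set.add s div else s) s) s ↔
      d ∈ s ∨ (d ∈ divisors ∧ ∃ num ∈ arr, PySem.Int.mod num d = 0) := by
  induction arr generalizing s with
  | nil => simp
  | cons n t ih =>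
    simp only [List.foldl_cons, ih, mem_innerFold, List.mem_cons]
    constructor
    · rintro ((h | h) | ⟨hd, m, hm, hmod⟩)
      · exact Or.inl h
      · exact Or.inr ⟨h.1, n, Or.inl rfl, h.2⟩
      · exact Or.inr ⟨hd, m, Or.inr hm, hmod⟩
    · rintro (h | ⟨hd, m, (rfl | hm), hmod⟩)
      · exact Or.inl (Or.inl h)
      · exact Or.inl (Or.inr ⟨hd, hmod⟩)
      · exact Or.inr ⟨hd, m, hm, hmod⟩

theorem mem_pvBad (divisors arr : List Int) (d : Int) :
    d ∈ pvBad divisors arr ↔ d ∈ divisors ∧ ∃ num ∈ arr, PySem.Int.mod num d = 0 := by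
  unfold pvBad
  rw [mem_badFold]
  simp [PySem.Set.empty]

-- A's fold equals a plain max-fold over the filtered divisors
theorem foldl_eq_filter (P : Int → Bool) (divisors : List Int) (a : Int) (ha : 0 ≤ a) :
    divisors.foldl (fun result div => if P div then result else max result div) a =
      (divisors.filter (fun d => decide (0 < d) && !(P d))).foldl max a := by
  induction divisors generalizing a with
  | nil => rfl
  | cons x t ih =>
    simp only [List.foldl_cons, List.filter_cons]
    by_cases hp : P x
    · simp only [hp, if_true, Bool.not_true, Bool.and_false]
      exact ih a ha
    · by_cases hx : 0 < x
      · simp only [hp, hx, decide_true, Bool.not_false, Bool.and_true, if_true,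
          List.foldl_cons]
        exact ih (max a x) (le_trans ha (le_max_left a x))
      · have hmax : max a x = a := max_eq_left (le_trans (not_lt.mp hx) ha)
        simp only [hp, hx, decide_false, Bool.false_and, hmax]
        exact ih a ha

theorem is_not_divisor_eq (divisors arr : List Int) :
    is_not_divisor divisors arr = is_not_divisor_alt divisors arr := by
  have hmem : ∀ d ∈ divisors, PySem.Set.contains (pvBad divisors arr) d =
      arr.any (fun num => PySem.Int.mod num d == 0) := by
    intro d hd
    by_cases h : ∃ num ∈ arr, PySem.Int.mod num d = 0
    · have hdmem : d ∈ pvBad divisors arr := (mem_pvBad divisors arr d).mpr ⟨hd, h⟩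
      have hany : arr.any (fun num => PySem.Int.mod num d == 0) = true := by
        simp only [List.any_eq_true, beq_iff_eq]
        exact h
      simp [PySem.Set.contains, hdmem, hany]
    · have hdmem : d ∉ pvBad divisors arr := fun hc => h ((mem_pvBad divisors arr d).mp hc).2
      have h' : ∀ x ∈ arr, PySem.Int.mod x d ≠ 0 := by simpa using h
      have hany : arr.any (fun num => PySem.Int.mod num d == 0) = false := by
        simp only [List.any_eq_false, beq_iff_eq]
        exact h'
      simp [PySem.Set.contains, hdmem, hany]
  have hfilter : divisors.filter (fun d =>
      decide (0 < d) && !(PySem.Set.contains (pvBad divisors arr) d)) =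
      divisors.filter (fun d => decide (0 < d) && !(arr.any (fun num => PySem.Int.mod num d == 0))) := by
    apply List.filter_congr
    intro d hd
    rw [hmem d hd]
  unfold is_not_divisor is_not_divisor_alt
  rw [hfilter, foldl_eq_filter (fun div => arr.any (fun num => PySem.Int.mod num div == 0)) divisors 0 le_rfl]
  cases hc : divisors.filter (fun d => decide (0 < d) && !(arr.any (fun num => PySem.Int.mod num d == 0))) with
  | nil => rfl
  | cons x t =>
    have hxpos : 0 < x := by
      have hx : x ∈ divisors.filter (fun d =>
          decide (0 < d) && !(arr.any (fun num => PySem.Int.mod num d == 0))) := by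
        rw [hc]; exact List.mem_cons_self
      have := List.of_mem_filter hx
      simp only [Bool.and_eq_true, decide_eq_true_eq] at this
      exact this.1
    rw [PySem.List.max?_id_cons, List.foldl_cons, max_eq_right (le_of_lt hxpos)]

-- ===== VERDICT (by name: the statement is the Claim_ definition above) =====
theorem is_not_divisor_spec : Claim_equal_is_not_divisor := by
  intro divisors arr _ _
  exact is_not_divisor_eq divisors arr
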